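-- pv_equiv track=rewrite | github.com/gaddyh/tami2_ai | green_api/contacts.py | contacts_to_name_ids
-- ===== SOURCE A (Python) =====
-- from typing import Dict
-- from collections import defaultdict
-- from typing import Dict, List, Iterable, Mapping, Any
--
-- def contacts_to_name_ids(contacts: Iterable[Mapping[str, Any]]) -> Dict[str, List[str]]:
--     """
--     Build name -> [id,...] mapping from GreenAPI GetContacts items.
--     Rules:
--     - use 'name' if present
--     - use 'contactName' if present
--     - if both present and equal -> keep once
--     - if both present and different -> add both (each maps to same id)
--     - if the same name appears for multiple ids -> keep all ids
--     """
--     result: defaultdict[str, set[str]] = defaultdict(set)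
--
--     for c in contacts:
--         chat_id = (c.get("id") or "").strip()
--         if not chat_id:
--             continue
--
--         name = (c.get("name") or "").strip()
--         contact_name = (c.get("contactName") or "").strip()
--
--         names: list[str] = []
--         if name:
--             names.append(name)
--         if contact_name and contact_name not in names:
--             names.append(contact_name)
--
--         for n in names:
--             result[n].add(chat_id)
--
--     # convert sets to lists (stable-ish order)
--     return {n: sorted(ids) for n, ids in result.items()}
-- ===== SOURCE B (Python) =====
-- from typing import Dict, List, Iterable, Mapping, Any
--
--
-- def _pairs(c: Mapping[str, Any]) -> List[tuple]:
--     """(name, chat_id) pairs contributed by one contact record."""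
--     cid = (c.get("id") or "").strip()
--     if not cid:
--         return []
--     n = (c.get("name") or "").strip()
--     m = (c.get("contactName") or "").strip()
--     return [(x, cid) for x in ([n] if n else []) + ([m] if m and m != n else [])]
--
-- def contacts_to_name_ids(contacts: Iterable[Mapping[str, Any]]) -> Dict[str, List[str]]:
--     """Same mapping, built as a flat (name, id) pair list that is then grouped."""
--     pairs = [p for c in contacts for p in _pairs(c)]
--     order = list(dict.fromkeys(n for n, _ in pairs))
--     return {n: sorted({i for m, i in pairs if m == n}) for n in order}
-- ===== Notes on version B (the rewrite author's own statement) =====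
-- stated objective: alternative
-- what changed: A accumulates into a defaultdict of sets inside a single loop; B is a staged pipeline: a helper flattens each contact into its (name, chat_id) pairs, the pair lists are concatenated, and the mapping is built afterwards by grouping the flat list (dict.fromkeys for first-occurrence key order, sorted set comprehension per key).
import Mathlib
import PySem

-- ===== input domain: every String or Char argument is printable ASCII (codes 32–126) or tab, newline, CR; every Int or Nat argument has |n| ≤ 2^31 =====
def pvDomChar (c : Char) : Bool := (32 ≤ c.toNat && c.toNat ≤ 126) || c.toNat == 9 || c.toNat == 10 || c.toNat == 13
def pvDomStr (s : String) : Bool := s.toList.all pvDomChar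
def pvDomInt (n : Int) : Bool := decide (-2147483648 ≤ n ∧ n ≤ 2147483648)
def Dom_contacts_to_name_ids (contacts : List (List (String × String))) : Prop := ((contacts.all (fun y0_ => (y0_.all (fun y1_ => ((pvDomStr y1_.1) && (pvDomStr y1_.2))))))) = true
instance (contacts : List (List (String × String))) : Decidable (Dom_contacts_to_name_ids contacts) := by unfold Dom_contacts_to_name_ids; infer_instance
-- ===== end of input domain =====

-- B replaces A's single accumulate-into-a-dict-of-sets loop by a staged pipeline: flatten
-- each contact to its (name, id) pairs, concatenate, then group the flat list (alternative
-- decomposition; no speed claim).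

-- ===== PORT A =====
def contacts_to_name_ids (contacts : List (List (String × String))) : List (String × List String) :=
  -- result: defaultdict(set) → Dict String (PySem.Set String); result[n].add(chat_id) is modify with default []
  let result : PySem.Dict String (List String) :=
    contacts.foldl (fun result c =>
      let chat_id := PySem.Str.strip (((PySem.Dict.mk c).get? "id").getD "")
      if chat_id = "" then result
      else
        let name := PySem.Str.strip (((PySem.Dict.mk c).get? "name").getD "")
        let contact_name := PySem.Str.strip (((PySem.Dict.mk c).get? "contactName").getD "")
        let names : List String := []
        let names := if name ≠ "" then names ++ [name] else names
        let names := if contact_name ≠ "" ∧ contact_name ∉ names then names ++ [contact_name] else names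
        names.foldl (fun r n => r.modify n [] (fun s => PySem.Set.add s chat_id)) result)
      PySem.Dict.empty
  result.items.map (fun p => (p.1, PySem.List.sorted p.2 (fun x => x) false))

-- ===== PORT B =====
-- helper _pairs: the (name, chat_id) pairs one contact contributes
def pvPairsOf (c : List (String × String)) : List (String × String) :=
  match PySem.Str.strip (PySem.Dict.getD (PySem.Dict.mk c) "id" "") with
  | "" => []
  | cid =>
    let n := PySem.Str.strip (PySem.Dict.getD (PySem.Dict.mk c) "name" "")
    let m := PySem.Str.strip (PySem.Dict.getD (PySem.Dict.mk c) "contactName" "")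
    ((if n ≠ "" then [n] else []) ++ (if m ≠ "" ∧ m ≠ n then [m] else [])).map (fun x => (x, cid))

def contacts_to_name_ids_alt (contacts : List (List (String × String))) : List (String × List String) :=
  let pairs := contacts.flatMap pvPairsOf
  let order := PySem.List.dedup (pairs.map Prod.fst)
  order.map (fun n =>
    (n, PySem.List.sorted (PySem.Set.ofList ((pairs.filter (fun p => p.1 == n)).map Prod.snd))
          (fun x => x) false))

-- ===== PRECONDITION & SPEC =====
def Spec_contacts_to_name_ids (contacts : List (List (String × String))) (out : List (String × List String)) : Prop := out = contacts_to_name_ids_alt contacts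
instance (contacts : List (List (String × String))) (out : List (String × List String)) : Decidable (Spec_contacts_to_name_ids contacts out) := by unfold Spec_contacts_to_name_ids; infer_instance

-- ===== CLAIM (what is proved, stated in full; the proofs are below) =====
def Claim_equal_contacts_to_name_ids : Prop := ∀ (contacts : List (List (String × String))), Dom_contacts_to_name_ids contacts → Spec_contacts_to_name_ids contacts (contacts_to_name_ids contacts)

-- ===== LEMMAS AND PROOFS =====

-- the grouping step of A's loop, over one (name, id) pair
def pvStep (d : PySem.Dict String (List String)) (p : String × String) : PySem.Dict String (List String) :=
  d.modify p.1 [] (fun s => PySem.Set.add s p.2)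

-- A's loop body is the pvStep-fold over that contact's pvPairsOf pairs
theorem pvA_step (d : PySem.Dict String (List String)) (c : List (String × String)) :
    (let chat_id := PySem.Str.strip (((PySem.Dict.mk c).get? "id").getD "")
     if chat_id = "" then d
     else
       let name := PySem.Str.strip (((PySem.Dict.mk c).get? "name").getD "")
       let contact_name := PySem.Str.strip (((PySem.Dict.mk c).get? "contactName").getD "")
       let names : List String := []
       let names := if name ≠ "" then names ++ [name] else names
       let names := if contact_name ≠ "" ∧ contact_name ∉ names then names ++ [contact_name] else names
       names.foldl (fun r n => r.modify n [] (fun s => PySem.Set.add s chat_id)) d)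
    = (pvPairsOf c).foldl pvStep d := by
  unfold pvPairsOf
  have hg : PySem.Dict.getD (PySem.Dict.mk c) "id" "" = ((PySem.Dict.mk c).get? "id").getD "" := rfl
  rw [hg]
  generalize PySem.Str.strip (((PySem.Dict.mk c).get? "id").getD "") = chat_id
  by_cases h0 : chat_id = ""
  · simp [h0]
  · rw [if_neg h0]
    split
    · simp_all
    · have hg2 : PySem.Dict.getD (PySem.Dict.mk c) "name" "" = ((PySem.Dict.mk c).get? "name").getD "" := rfl
      have hg3 : PySem.Dict.getD (PySem.Dict.mk c) "contactName" "" = ((PySem.Dict.mk c).get? "contactName").getD "" := rfl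
      rw [hg2, hg3]
      set name := PySem.Str.strip (((PySem.Dict.mk c).get? "name").getD "")
      set cn := PySem.Str.strip (((PySem.Dict.mk c).get? "contactName").getD "")
      by_cases hn : name = ""
      · by_cases hcc : cn = ""
        · simp [hn, hcc]
        · have hcn : cn ≠ name := by simp [hn, hcc]
          simp [hn, hcc, pvStep]
      · by_cases hcc : cn = "" <;> by_cases hcn : cn = name <;>
          simp [hn, hcc, hcn, pvStep]

-- folding the per-contact folds = one fold over the flattened pair list
theorem pv_foldl_flatMap (cs : List (List (String × String))) (d : PySem.Dict String (List String)) :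
    cs.foldl (fun d c => (pvPairsOf c).foldl pvStep d) d = (cs.flatMap pvPairsOf).foldl pvStep d := by
  induction cs generalizing d with
  | nil => rfl
  | cons c t ih => simp [List.foldl_append, ih]

-- the value stored at key c after folding pvStep over a pair list
theorem pvStep_getD (l : List (String × String)) (d : PySem.Dict String (List String)) (c : String) :
    (l.foldl pvStep d).getD c [] =
      PySem.Set.update (d.getD c []) ((l.filter (fun p => p.1 == c)).map Prod.snd) := by
  induction l generalizing d with
  | nil => rfl
  | cons p t ih =>
    simp only [List.foldl_cons, List.filter_cons, ih]
    by_cases h : p.1 = c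
    · simp [pvStep, h, PySem.Set.update]
    · have h' : ¬c = p.1 := fun e => h e.symm
      simp [pvStep, h, h', PySem.Dict.getD_modify]

-- keys of the pvStep-fold = first-occurrence-deduplicated names of the pair list
theorem pv_keys (l : List (String × String)) :
    (l.foldl pvStep PySem.Dict.empty).keys = PySem.List.dedup (l.map Prod.fst) := by
  have h := PySem.Dict.keys_foldl_modify_key l (fun p => p.1) ([] : List String)
      (fun _ p => fun s => PySem.Set.add s p.2) PySem.Dict.empty
  rw [show (List.foldl pvStep PySem.Dict.empty l)
      = List.foldl (fun d x => d.modify x.1 [] fun s => PySem.Set.add s x.2) PySem.Dict.empty l from rfl]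
  rw [h, PySem.List.dedup_eq_ofList]
  rfl

theorem pv_nodup_keys (l : List (String × String)) :
    (l.foldl pvStep PySem.Dict.empty).keys.Nodup := by
  exact PySem.Dict.nodup_keys_foldl_modify_key l (fun p => p.1) ([] : List String)
      (fun _ p => fun s => PySem.Set.add s p.2) PySem.Dict.empty (by simp [pysem])

-- joint shape of both outputs, over the flattened pair list
theorem pv_out (l : List (String × String)) :
    ((l.foldl pvStep PySem.Dict.empty).items).map
        (fun p => (p.1, PySem.List.sorted p.2 (fun x => x) false)) =
      (PySem.List.dedup (l.map Prod.fst)).map (fun n =>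
        (n, PySem.List.sorted (PySem.Set.ofList ((l.filter (fun p => p.1 == n)).map Prod.snd))
              (fun x => x) false)) := by
  rw [PySem.Dict.items_eq_map_keys _ (pv_nodup_keys l) ([] : List String), List.map_map, pv_keys]
  apply List.map_congr_left
  intro n _
  simp only [Function.comp]
  rw [pvStep_getD]
  rfl

-- ===== VERDICT (by name: the statement is the Claim_ definition above) =====
theorem contacts_to_name_ids_spec : Claim_equal_contacts_to_name_ids := by
  intro contacts _
  unfold Spec_contacts_to_name_ids contacts_to_name_ids contacts_to_name_ids_alt
  have hA : (fun (result : PySem.Dict String (List String)) (c : List (String × String)) =>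
      let chat_id := PySem.Str.strip (((PySem.Dict.mk c).get? "id").getD "")
      if chat_id = "" then result
      else
        let name := PySem.Str.strip (((PySem.Dict.mk c).get? "name").getD "")
        let contact_name := PySem.Str.strip (((PySem.Dict.mk c).get? "contactName").getD "")
        let names : List String := []
        let names := if name ≠ "" then names ++ [name] else names
        let names := if contact_name ≠ "" ∧ contact_name ∉ names then names ++ [contact_name] else names
        names.foldl (fun r n => r.modify n [] (fun s => PySem.Set.add s chat_id)) result)
      = fun d c => (pvPairsOf c).foldl pvStep d :=
    funext fun d => funext fun c => pvA_step d c
  rw [hA, pv_foldl_flatMap]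
  exact pv_out (contacts.flatMap pvPairsOf)
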